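-- pv_equiv track=rewrite | github.com/breadbored/butano-tutorial-series | chapter-5-backgrounds/scripts/utils.py | find_color_depth_and_unused_color
-- ===== SOURCE A (Python) =====
-- def find_color_depth_and_unused_color(
--     img_data_rgba,
-- ) -> tuple[int, tuple[int, int, int] | None, int]:
--     used_colors = set([(x[0], x[1], x[2]) for x in img_data_rgba if x[3] == 255])
--     color_depth = 16 if len(used_colors) <= 16 else 256
--
--     def _find_unused_color():
--         for r in range(256):
--             for g in range(256):
--                 for b in range(256):
--                     if (r, g, b) not in used_colors:
--                         return (r, g, b)
--         return None
--
--     unused_color = _find_unused_color()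
--
--     return (color_depth, unused_color, len(used_colors))
-- ===== SOURCE B (Python) =====
-- def find_color_depth_and_unused_color(
--     img_data_rgba,
-- ) -> tuple[int, tuple[int, int, int] | None, int]:
--     used = {(p[0], p[1], p[2]) for p in img_data_rgba if p[3] == 255}
--     n = len(used)
--     color_depth = 16 if n <= 16 else 256
--     # pack each in-range used color into one integer and sort; scan for first gap
--     codes = sorted(r * 65536 + g * 256 + b for (r, g, b) in used
--                    if 0 <= r < 256 and 0 <= g < 256 and 0 <= b < 256)
--     expected = 0
--     for c in codes:
--         if c > expected:
--             break
--         expected = c + 1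
--     if expected >= 2 ** 24:
--         unused = None
--     else:
--         unused = (expected // 65536, expected // 256 % 256, expected % 256)
--     return (color_depth, unused, n)
-- ===== Notes on version B (the rewrite author's own statement) =====
-- stated objective: alternative
-- what changed: Replaces A's 256^3 nested brute-force membership scan for the first unused color by packing the in-range used colors into integers, sorting them, and doing a single first-gap scan over the sorted codes.
import Mathlib
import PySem

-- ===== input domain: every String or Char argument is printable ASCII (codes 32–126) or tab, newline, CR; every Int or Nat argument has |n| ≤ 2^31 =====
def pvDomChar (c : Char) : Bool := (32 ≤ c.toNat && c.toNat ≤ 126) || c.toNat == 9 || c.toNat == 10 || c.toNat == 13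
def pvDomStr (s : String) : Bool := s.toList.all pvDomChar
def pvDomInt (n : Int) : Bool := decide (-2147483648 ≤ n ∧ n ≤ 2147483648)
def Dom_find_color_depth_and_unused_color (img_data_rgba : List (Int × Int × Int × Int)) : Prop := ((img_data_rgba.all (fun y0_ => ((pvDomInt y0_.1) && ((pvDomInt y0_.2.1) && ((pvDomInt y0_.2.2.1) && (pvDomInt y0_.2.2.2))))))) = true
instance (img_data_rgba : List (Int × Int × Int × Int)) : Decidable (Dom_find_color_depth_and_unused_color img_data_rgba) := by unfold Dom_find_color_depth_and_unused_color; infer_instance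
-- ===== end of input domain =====

-- B replaces A's 256^3 brute-force scan for the first unused color by a sort of the
-- packed used color codes followed by a single first-gap scan (objective: alternative).

-- ===== PORT A =====
-- the used-colors set: set([(x[0], x[1], x[2]) for x in img_data_rgba if x[3] == 255])
def pvUsedColors (img_data_rgba : List (Int × Int × Int × Int)) : PySem.Set (Int × Int × Int) :=
  PySem.Set.ofList ((img_data_rgba.filter (fun x => x.2.2.2 == 255)).map (fun x => (x.1, x.2.1, x.2.2.1)))

-- the inner helper _find_unused_color: three nested for-loops with an early return
def pvFindUnusedColor (used_colors : PySem.Set (Int × Int × Int)) : Option (Int × Int × Int) :=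
  (PySem.List.pyRange 0 256 1).findSome? (fun r =>
    (PySem.List.pyRange 0 256 1).findSome? (fun g =>
      (PySem.List.pyRange 0 256 1).findSome? (fun b =>
        if PySem.Set.contains used_colors (r, g, b) then none else some (r, g, b))))

def find_color_depth_and_unused_color (img_data_rgba : List (Int × Int × Int × Int)) : Int × (Option (Int × Int × Int)) × Int :=
  let used_colors := pvUsedColors img_data_rgba
  let color_depth : Int := if PySem.Set.len used_colors ≤ 16 then 16 else 256
  let unused_color := pvFindUnusedColor used_colors
  (color_depth, unused_color, PySem.Set.len used_colors)

-- ===== PORT B =====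
-- first-gap scan: for c in codes: if c > expected: break; expected = c + 1
def pvGapScan : List Int → Int → Int
  | [], expected => expected
  | c :: rest, expected => if c > expected then expected else pvGapScan rest (c + 1)

def find_color_depth_and_unused_color_alt (img_data_rgba : List (Int × Int × Int × Int)) : Int × (Option (Int × Int × Int)) × Int :=
  let used := PySem.Set.ofList ((img_data_rgba.filter (fun p => p.2.2.2 == 255)).map (fun p => (p.1, p.2.1, p.2.2.1)))
  let n : Int := PySem.Set.len used
  let color_depth : Int := if n ≤ 16 then 16 else 256
  let codes := PySem.List.sorted
    (((used.filter (fun t => decide (0 ≤ t.1 ∧ t.1 < 256) && decide (0 ≤ t.2.1 ∧ t.2.1 < 256) && decide (0 ≤ t.2.2 ∧ t.2.2 < 256))).map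
      (fun t => t.1 * 65536 + t.2.1 * 256 + t.2.2)))
    (fun x => x) false
  let expected := pvGapScan codes 0
  let unused : Option (Int × Int × Int) :=
    if expected ≥ 2 ^ 24 then none
    else some (PySem.Int.floordiv expected 65536,
               PySem.Int.mod (PySem.Int.floordiv expected 256) 256,
               PySem.Int.mod expected 256)
  (color_depth, unused, n)

-- ===== PRECONDITION & SPEC =====
def Spec_find_color_depth_and_unused_color (img_data_rgba : List (Int × Int × Int × Int)) (out : Int × (Option (Int × Int × Int)) × Int) : Prop := out = find_color_depth_and_unused_color_alt img_data_rgba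
instance (img_data_rgba : List (Int × Int × Int × Int)) (out : Int × (Option (Int × Int × Int)) × Int) : Decidable (Spec_find_color_depth_and_unused_color img_data_rgba out) := by unfold Spec_find_color_depth_and_unused_color; infer_instance

-- ===== CLAIM (what is proved, stated in full; the proofs are below) =====
def Claim_equal_find_color_depth_and_unused_color : Prop := ∀ (img_data_rgba : List (Int × Int × Int × Int)), Dom_find_color_depth_and_unused_color img_data_rgba → Spec_find_color_depth_and_unused_color img_data_rgba (find_color_depth_and_unused_color img_data_rgba)

-- ===== LEMMAS AND PROOFS =====

-- a triple (r,g,b) has all channels in [0,256)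
def pvInR (t : Int × Int × Int) : Prop := 0 ≤ t.1 ∧ t.1 < 256 ∧ 0 ≤ t.2.1 ∧ t.2.1 < 256 ∧ 0 ≤ t.2.2 ∧ t.2.2 < 256

def pvPack (t : Int × Int × Int) : Int := t.1 * 65536 + t.2.1 * 256 + t.2.2

def pvDecode (m : Int) : Int × Int × Int := (m / 65536, m / 256 % 256, m % 256)

lemma pvPack_lt (t : Int × Int × Int) (h : pvInR t) : 0 ≤ pvPack t ∧ pvPack t < 2 ^ 24 := by
  obtain ⟨a, b, c⟩ := t; unfold pvInR pvPack at *; dsimp at *; constructor <;> nlinarith [h.1, h.2.1, h.2.2.1, h.2.2.2.1, h.2.2.2.2.1, h.2.2.2.2.2]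

lemma pvPack_inj {t t' : Int × Int × Int} (h : pvInR t) (h' : pvInR t') (he : pvPack t = pvPack t') : t = t' := by
  obtain ⟨a, b, c⟩ := t; obtain ⟨a', b', c'⟩ := t'
  unfold pvInR pvPack at *; dsimp at *
  have : a = a' ∧ b = b' ∧ c = c' := by omega
  simp [this.1, this.2.1, this.2.2]

lemma pvDecode_pack (m : Int) (h0 : 0 ≤ m) (h1 : m < 2 ^ 24) : pvInR (pvDecode m) ∧ pvPack (pvDecode m) = m := by
  unfold pvInR pvPack pvDecode; dsimp; omega

-- gap scan on a strictly increasing list of elements ≥ e returns the least value ≥ e missing from the list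
lemma pvGapScan_spec (l : List Int) : ∀ e : Int, l.Pairwise (· < ·) → (∀ c ∈ l, e ≤ c) →
    e ≤ pvGapScan l e ∧ pvGapScan l e ∉ l ∧ ∀ j, e ≤ j → j < pvGapScan l e → j ∈ l := by
  induction l with
  | nil => intro e _ _; exact ⟨le_refl _, by simp [pvGapScan], by intro j h1 h2; simp [pvGapScan] at h2; omega⟩
  | cons c rest ih =>
    intro e hp hge
    have hce : e ≤ c := hge c (by simp)
    have hrest : ∀ x ∈ rest, c < x := by
      intro x hx; exact (List.pairwise_cons.mp hp).1 x hx
    by_cases hgt : c > e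
    · simp only [pvGapScan, if_pos hgt]
      refine ⟨le_refl _, ?_, ?_⟩
      · intro hmem; rcases List.mem_cons.mp hmem with h | h
        · omega
        · have := hrest _ h; omega
      · intro j h1 h2; omega
    · simp only [pvGapScan, if_neg hgt]
      have hceq : c = e := by omega
      have := ih (c + 1) (List.pairwise_cons.mp hp).2 (fun x hx => by have := hrest x hx; omega)
      obtain ⟨hle, hnot, hall⟩ := this
      refine ⟨by omega, ?_, ?_⟩
      · intro hmem; rcases List.mem_cons.mp hmem with h | h
        · omega
        · exact hnot h
      · intro j h1 h2
        by_cases hj : j = c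
        · simp [hj]
        · exact List.mem_cons_of_mem _ (hall j (by omega) h2)

-- first-hit lemma for findSome? over range(a, b)
lemma pvFindSome?_pyRange_some {α : Type} (a b : Int) (f : Int → Option α) (m : Int) (x : α)
    (h1 : a ≤ m) (h2 : m < b) (hm : f m = some x) (hbefore : ∀ j, a ≤ j → j < m → f j = none) :
    (PySem.List.pyRange a b 1).findSome? f = some x := by
  rw [PySem.List.pyRange_one_append a m b (by omega) (by omega), List.findSome?_append]
  have hfst : (PySem.List.pyRange a m 1).findSome? f = none := by
    rw [List.findSome?_eq_none_iff]
    intro j hj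
    have := (PySem.List.mem_pyRange_one).mp hj
    exact hbefore j this.1 this.2
  rw [hfst, PySem.List.pyRange_one_cons (by omega : m < b)]
  simp [List.findSome?, hm]

lemma pvFindSome?_pyRange_none {α : Type} (a b : Int) (f : Int → Option α)
    (h : ∀ j, a ≤ j → j < b → f j = none) :
    (PySem.List.pyRange a b 1).findSome? f = none := by
  rw [List.findSome?_eq_none_iff]
  intro j hj
  have := (PySem.List.mem_pyRange_one).mp hj
  exact h j this.1 this.2


-- membership characterisation of B's sorted code list
lemma pvCodes_mem (U : PySem.Set (Int × Int × Int)) (m : Int) :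
    m ∈ PySem.List.sorted
      (((U.filter (fun t => decide (0 ≤ t.1 ∧ t.1 < 256) && decide (0 ≤ t.2.1 ∧ t.2.1 < 256) && decide (0 ≤ t.2.2 ∧ t.2.2 < 256))).map
        (fun t => t.1 * 65536 + t.2.1 * 256 + t.2.2))) (fun x => x) false
    ↔ ∃ t ∈ U, pvInR t ∧ pvPack t = m := by
  rw [PySem.List.mem_sorted]
  simp only [List.mem_map, List.mem_filter, pvInR, pvPack, Bool.and_eq_true, decide_eq_true_eq]
  constructor
  · rintro ⟨t, ht, hp⟩; exact ⟨t, ht.1, by tauto, hp⟩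
  · rintro ⟨t, htU, hR, hp⟩; exact ⟨t, ⟨htU, by tauto⟩, hp⟩

set_option maxHeartbeats 1000000 in
theorem find_color_depth_and_unused_color_spec : Claim_equal_find_color_depth_and_unused_color := by
  intro img _
  unfold Spec_find_color_depth_and_unused_color find_color_depth_and_unused_color find_color_depth_and_unused_color_alt pvUsedColors
  set U : PySem.Set (Int × Int × Int) :=
    PySem.Set.ofList ((img.filter (fun x => x.2.2.2 == 255)).map (fun x => (x.1, x.2.1, x.2.2.1))) with hUdef
  dsimp only
  refine Prod.ext rfl (Prod.ext ?_ rfl)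
  -- it remains to relate the two unused-color searches
  show pvFindUnusedColor U = _
  set codes := PySem.List.sorted
    (((U.filter (fun t => decide (0 ≤ t.1 ∧ t.1 < 256) && decide (0 ≤ t.2.1 ∧ t.2.1 < 256) && decide (0 ≤ t.2.2 ∧ t.2.2 < 256))).map
      (fun t => t.1 * 65536 + t.2.1 * 256 + t.2.2))) (fun x => x) false with hcodes
  have hmem : ∀ m : Int, m ∈ codes ↔ ∃ t ∈ U, pvInR t ∧ pvPack t = m := fun m => pvCodes_mem U m
  -- codes is strictly increasing
  have hnodup : codes.Nodup := by
    have hUnodup : U.Nodup := PySem.Set.nodup_ofList _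
    have hfil := hUnodup.filter (p := fun t => decide (0 ≤ t.1 ∧ t.1 < 256) && decide (0 ≤ t.2.1 ∧ t.2.1 < 256) && decide (0 ≤ t.2.2 ∧ t.2.2 < 256))
    have hinj : ∀ x ∈ (U.filter (fun t => decide (0 ≤ t.1 ∧ t.1 < 256) && decide (0 ≤ t.2.1 ∧ t.2.1 < 256) && decide (0 ≤ t.2.2 ∧ t.2.2 < 256))),
        ∀ y ∈ (U.filter (fun t => decide (0 ≤ t.1 ∧ t.1 < 256) && decide (0 ≤ t.2.1 ∧ t.2.1 < 256) && decide (0 ≤ t.2.2 ∧ t.2.2 < 256))), (fun t : Int × Int × Int => t.1 * 65536 + t.2.1 * 256 + t.2.2) x = (fun t : Int × Int × Int => t.1 * 65536 + t.2.1 * 256 + t.2.2) y → x = y := by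
      intro x hx y hy hxy
      simp only [List.mem_filter, Bool.and_eq_true, decide_eq_true_eq] at hx hy
      exact pvPack_inj (by unfold pvInR; tauto) (by unfold pvInR; tauto) hxy
    have hLnodup := (List.nodup_map_iff_inj_on hfil).mpr hinj
    exact ((PySem.List.sorted_perm _ _ _).nodup_iff).mpr hLnodup
  have hpw : codes.Pairwise (· < ·) := by
    have hle : codes.Pairwise (· ≤ ·) := PySem.List.sorted_pairwise _ (fun x => x)
    have := List.Pairwise.and hle hnodup
    exact this.imp (fun h => lt_of_le_of_ne h.1 h.2)
  have hge0 : ∀ c ∈ codes, (0 : Int) ≤ c := by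
    intro c hc
    obtain ⟨t, _, htR, hp⟩ := (hmem c).mp hc
    have := pvPack_lt t htR; omega
  obtain ⟨hEge, hEnot, hEall⟩ := pvGapScan_spec codes 0 hpw hge0
  set E := pvGapScan codes 0 with hEdef
  -- any in-range triple whose code is below E is a used color
  have hmemT : ∀ t, pvInR t → pvPack t < E → PySem.Set.contains U t = true := by
    intro t ht hlt
    have hj := hEall (pvPack t) (pvPack_lt t ht).1 hlt
    obtain ⟨t', ht'U, ht'R, he⟩ := (hmem _).mp hj
    have : t' = t := pvPack_inj ht'R ht he
    exact (PySem.Set.contains_iff U t).mpr (this ▸ ht'U)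
  by_cases hE : E < 2 ^ 24
  · -- B returns the decoded first gap; A's scan stops exactly there
    obtain ⟨hinR, hpd⟩ := pvDecode_pack E hEge hE
    have hnotused : PySem.Set.contains U (pvDecode E) = false := by
      rw [Bool.eq_false_iff]
      intro hc
      have hmemU := (PySem.Set.contains_iff U _).mp hc
      exact hEnot ((hmem E).mpr ⟨pvDecode E, hmemU, hinR, hpd⟩)
    obtain ⟨hr0, hr1, hg0, hg1, hb0, hb1⟩ := hinR
    have hA : pvFindUnusedColor U = some (pvDecode E) := by
      unfold pvFindUnusedColor
      apply pvFindSome?_pyRange_some 0 256 _ (pvDecode E).1 _ hr0 hr1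
      · apply pvFindSome?_pyRange_some 0 256 _ (pvDecode E).2.1 _ hg0 hg1
        · apply pvFindSome?_pyRange_some 0 256 _ (pvDecode E).2.2 _ hb0 hb1
          · rw [show ((pvDecode E).1, (pvDecode E).2.1, (pvDecode E).2.2) = pvDecode E from rfl, hnotused]
            simp
          · intro b hb hblt
            have hR : pvInR ((pvDecode E).1, (pvDecode E).2.1, b) := by simp only [pvInR]; omega
            have hlt : pvPack ((pvDecode E).1, (pvDecode E).2.1, b) < E := by
              simp only [pvPack] at hpd ⊢; omega
            rw [hmemT _ hR hlt]; simp
        · intro g hg hglt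
          apply pvFindSome?_pyRange_none
          intro b hb hbu
          have hR : pvInR ((pvDecode E).1, g, b) := by simp only [pvInR]; omega
          have hlt : pvPack ((pvDecode E).1, g, b) < E := by
            simp only [pvPack] at hpd ⊢; omega
          rw [hmemT _ hR hlt]; simp
      · intro r hr hrlt
        apply pvFindSome?_pyRange_none; intro g hg hgu
        apply pvFindSome?_pyRange_none; intro b hb hbu
        have hR : pvInR (r, g, b) := by simp only [pvInR]; omega
        have hlt : pvPack (r, g, b) < E := by
          simp only [pvPack] at hpd ⊢; omega
        rw [hmemT _ hR hlt]; simp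
    rw [hA, if_neg (by omega : ¬ E ≥ 2 ^ 24)]
    congr 1
    unfold pvDecode
    rw [PySem.Int.floordiv_eq_ediv_of_pos (by norm_num),
        PySem.Int.floordiv_eq_ediv_of_pos (by norm_num : (0:Int) < 256),
        PySem.Int.mod_eq_emod_of_pos (by norm_num : (0:Int) < 256),
        PySem.Int.mod_eq_emod_of_pos (by norm_num : (0:Int) < 256)]
  · -- every 24-bit color is used: A's scan exhausts, B's gap is past 2^24
    have hA : pvFindUnusedColor U = none := by
      unfold pvFindUnusedColor
      apply pvFindSome?_pyRange_none; intro r hr hru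
      apply pvFindSome?_pyRange_none; intro g hg hgu
      apply pvFindSome?_pyRange_none; intro b hb hbu
      have hR : pvInR (r, g, b) := by simp only [pvInR]; omega
      have hlt : pvPack (r, g, b) < E := by
        have := pvPack_lt _ hR; omega
      rw [hmemT _ hR hlt]; simp
    rw [hA, if_pos (by omega : E ≥ 2 ^ 24)]
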